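-- pv_equiv track=rewrite | github.com/iantsaii/JustApply | daily_scraper.py | get_text_diff
-- ===== SOURCE A (Python) =====
-- def get_text_diff(old_text: str, new_text: str) -> str:
--     """Generate a diff of line additions and removals between two text contents, diff-style."""
--     from collections import Counter
--     # Split by newlines
--     old_lines = [line.strip() for line in old_text.splitlines() if line.strip()]
--     new_lines = [line.strip() for line in new_text.splitlines() if line.strip()]
--     old_counts = Counter(old_lines)
--     new_counts = Counter(new_lines)
--
--     all_lines = sorted(set(old_counts) | set(new_counts))
--     diff_lines = []
--     for line in all_lines:
--         old_count = old_counts.get(line, 0)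
--         new_count = new_counts.get(line, 0)
--         if old_count == new_count:
--             continue
--         if new_count > old_count:
--             # Added lines
--             count = new_count - old_count
--             prefix = '+ '
--             suffix = f' x{count}' if count > 1 else ''
--             diff_lines.append(f'{prefix}{line}{suffix}')
--         elif old_count > new_count:
--             # Removed lines
--             count = old_count - new_count
--             prefix = '- '
--             suffix = f' x{count}' if count > 1 else ''
--             diff_lines.append(f'{prefix}{line}{suffix}')
--     if not diff_lines:
--         return "No line changes."
--     return '\n'.join(diff_lines)
-- ===== SOURCE B (Python) =====
-- def get_text_diff(old_text: str, new_text: str) -> str: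
--     """Generate a diff of line additions and removals between two text contents, diff-style."""
--     # Merge-scan of the two sorted multisets of stripped nonempty lines: no Counter,
--     # no dict, no key-set union -- two pointers consume equal-line runs in lockstep.
--     old = sorted(s for s in (l.strip() for l in old_text.splitlines()) if s)
--     new = sorted(s for s in (l.strip() for l in new_text.splitlines()) if s)
--     parts = []
--     i, j, m, n = 0, 0, len(old), len(new)
--     while i < m or j < n:
--         if j >= n or (i < m and old[i] <= new[j]):
--             line = old[i]
--         else:
--             line = new[j]
--         oc = nc = 0
--         while i < m and old[i] == line:
--             i += 1
--             oc += 1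
--         while j < n and new[j] == line:
--             j += 1
--             nc += 1
--         d = nc - oc
--         if d:
--             c = abs(d)
--             parts.append(('+ ' if d > 0 else '- ') + line + (f' x{c}' if c > 1 else ''))
--     return '\n'.join(parts) if parts else "No line changes."
-- ===== Notes on version B (the rewrite author's own statement) =====
-- stated objective: alternative
-- what changed: B drops the Counter/dict machinery entirely: it sorts the two stripped-line lists and runs a two-pointer merge scan that consumes equal-line runs from both lists in lockstep, emitting a +/- entry from the run-length difference; sorted-merge output order replaces A's sorted key-set union.
import Mathlib
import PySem

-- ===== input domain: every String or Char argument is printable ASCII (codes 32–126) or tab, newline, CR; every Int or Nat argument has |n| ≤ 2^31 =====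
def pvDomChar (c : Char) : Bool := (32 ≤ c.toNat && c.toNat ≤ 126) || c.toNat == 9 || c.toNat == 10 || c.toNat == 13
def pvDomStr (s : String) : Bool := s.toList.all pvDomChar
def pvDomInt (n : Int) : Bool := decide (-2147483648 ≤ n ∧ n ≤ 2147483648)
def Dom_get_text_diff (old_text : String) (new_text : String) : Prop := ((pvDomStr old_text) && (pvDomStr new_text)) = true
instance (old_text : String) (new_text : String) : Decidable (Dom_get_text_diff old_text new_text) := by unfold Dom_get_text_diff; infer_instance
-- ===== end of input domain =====

-- B replaces A's two Counters + sorted key-set union by a two-pointer merge scan over the two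
-- sorted stripped-line lists, consuming equal-line runs in lockstep (alternative algorithm, no dict).

-- ===== PORT A =====
def get_text_diff (old_text : String) (new_text : String) : String :=
  let old_lines := ((PySem.Str.splitlines old_text).filter
      (fun l => PySem.Str.strip l != "")).map PySem.Str.strip
  let new_lines := ((PySem.Str.splitlines new_text).filter
      (fun l => PySem.Str.strip l != "")).map PySem.Str.strip
  let old_counts := PySem.Dict.counter old_lines
  let new_counts := PySem.Dict.counter new_lines
  let all_lines := PySem.List.sorted
      (PySem.Set.union (PySem.Set.ofList old_counts.keys) new_counts.keys) (fun x => x) false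
  let diff_lines := all_lines.foldl (fun acc line =>
    let old_count := old_counts.getD line 0
    let new_count := new_counts.getD line 0
    if old_count == new_count then acc
    else if new_count > old_count then
      let count := new_count - old_count
      let suffix := if count > 1 then " x" ++ PySem.Int.toStr count else ""
      acc ++ ["+ " ++ line ++ suffix]
    else if old_count > new_count then
      let count := old_count - new_count
      let suffix := if count > 1 then " x" ++ PySem.Int.toStr count else ""
      acc ++ ["- " ++ line ++ suffix]
    else acc) []
  if diff_lines = [] then "No line changes." else PySem.Str.join "\n" diff_lines

-- ===== PORT B =====
-- the inner `while old[i] == line` run-consuming loop: returns (run length, rest)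
def pvRun (line : String) : List String → Int × List String
  | [] => (0, [])
  | x :: xs =>
    if x = line then
      let r := pvRun line xs
      (r.1 + 1, r.2)
    else (0, x :: xs)

-- one loop body's conditional append: d = nc - oc, emit with sign/abs
def pvEntry (line : String) (oc nc : Int) : List String :=
  let d := nc - oc
  if d ≠ 0 then
    let c := |d|
    [(if d > 0 then "+ " else "- ") ++ line ++ (if c > 1 then " x" ++ PySem.Int.toStr c else "")]
  else []

theorem pvRun_len_le (line : String) (l : List String) : (pvRun line l).2.length ≤ l.length := by
  induction l with
  | nil => simp [pvRun]
  | cons x xs ih =>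
    simp only [pvRun]
    split
    · exact Nat.le_trans ih (Nat.le_succ _)
    · simp

-- the outer `while i < m or j < n` merge loop
def pvMerge : List String → List String → List String
  | [], [] => []
  | x :: o, [] =>
      let ro := pvRun x (x :: o)
      pvEntry x ro.1 0 ++ pvMerge ro.2 []
  | [], y :: n =>
      let rn := pvRun y (y :: n)
      pvEntry y 0 rn.1 ++ pvMerge [] rn.2
  | x :: o, y :: n =>
      let line := if x ≤ y then x else y
      let ro := pvRun line (x :: o)
      let rn := pvRun line (y :: n)
      pvEntry line ro.1 rn.1 ++ pvMerge ro.2 rn.2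
termination_by o n => o.length + n.length
decreasing_by
  · have h := pvRun_len_le x o
    simp [pvRun] at *
    omega
  · have h := pvRun_len_le y n
    simp [pvRun] at *
    omega
  · by_cases hxy : x ≤ y
    · have h1 := pvRun_len_le x o
      have h2 := pvRun_len_le (if x ≤ y then x else y) (y :: n)
      simp [pvRun, hxy] at *
      omega
    · have h1 := pvRun_len_le y n
      have h2 := pvRun_len_le (if x ≤ y then x else y) (x :: o)
      have hne : ¬ (x = y) := fun h => hxy (le_of_eq h)
      simp [pvRun, hxy, hne] at *
      omega

def get_text_diff_alt (old_text : String) (new_text : String) : String :=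
  let old := PySem.List.sorted
      (((PySem.Str.splitlines old_text).map PySem.Str.strip).filter (fun s => s != ""))
      (fun x => x) false
  let new := PySem.List.sorted
      (((PySem.Str.splitlines new_text).map PySem.Str.strip).filter (fun s => s != ""))
      (fun x => x) false
  let parts := pvMerge old new
  if parts = [] then "No line changes." else PySem.Str.join "\n" parts

-- ===== PRECONDITION & SPEC =====
def Spec_get_text_diff (old_text : String) (new_text : String) (out : String) : Prop := out = get_text_diff_alt old_text new_text
instance (old_text : String) (new_text : String) (out : String) : Decidable (Spec_get_text_diff old_text new_text out) := by unfold Spec_get_text_diff; infer_instance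

-- ===== CLAIM (what is proved, stated in full; the proofs are below) =====
def Claim_equal_get_text_diff : Prop := ∀ (old_text : String) (new_text : String), Dom_get_text_diff old_text new_text → Spec_get_text_diff old_text new_text (get_text_diff old_text new_text)

-- ===== LEMMAS AND PROOFS =====

-- on a sorted list whose elements all dominate k, the run loop captures every copy of k
theorem pvRun_eq (k : String) (s : List String) (hs : s.Pairwise (· ≤ ·))
    (hmin : ∀ x ∈ s, k ≤ x) :
    pvRun k s = ((s.count k : Int), s.filter (fun x => x ≠ k)) := by
  induction s with
  | nil => simp [pvRun]
  | cons x xs ih =>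
    rcases List.pairwise_cons.mp hs with ⟨hx, hxs⟩
    by_cases hxk : x = k
    · subst hxk
      have ihr := ih hxs (fun y hy => hmin y (List.mem_cons_of_mem _ hy))
      simp only [pvRun, ihr, List.count_cons_self, List.filter_cons]
      simp
    · have hklt : k < x := lt_of_le_of_ne (hmin x (List.mem_cons_self)) (fun h => hxk h.symm)
      have hnot : k ∉ x :: xs := by
        intro hmem
        rcases List.mem_cons.mp hmem with h | h
        · exact hxk h.symm
        · exact absurd (lt_of_lt_of_le hklt (hx k h)) (lt_irrefl k)
      simp only [pvRun, if_neg hxk]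
      rw [List.count_eq_zero.mpr hnot, List.filter_eq_self.mpr ?_]
      · simp
      · intro a ha
        simp only [ne_eq, decide_eq_true_eq]
        intro h; subst h; exact hnot ha

-- the merge loop over two sorted lists equals the per-key emission over any strictly
-- increasing enumeration of the union of their elements
theorem pvMerge_eq (keys : List String) : ∀ s t : List String,
    keys.Pairwise (· < ·) → s.Pairwise (· ≤ ·) → t.Pairwise (· ≤ ·) →
    (∀ x, (x ∈ s ∨ x ∈ t) ↔ x ∈ keys) →
    pvMerge s t = keys.flatMap (fun k => pvEntry k (s.count k) (t.count k)) := by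
  induction keys with
  | nil =>
    intro s t _ _ _ hmem
    have hs : s = [] := List.eq_nil_iff_forall_not_mem.mpr
      (fun x hx => by simpa using (hmem x).mp (Or.inl hx))
    have ht : t = [] := List.eq_nil_iff_forall_not_mem.mpr
      (fun x hx => by simpa using (hmem x).mp (Or.inr hx))
    subst hs; subst ht; simp [pvMerge]
  | cons k rest ih =>
    intro s t hk hs ht hmem
    rcases List.pairwise_cons.mp hk with ⟨hkrest, hrest⟩
    have hmin_s : ∀ x ∈ s, k ≤ x := by
      intro x hx
      rcases List.mem_cons.mp ((hmem x).mp (Or.inl hx)) with h | h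
      · exact le_of_eq h.symm
      · exact le_of_lt (hkrest x h)
    have hmin_t : ∀ x ∈ t, k ≤ x := by
      intro x hx
      rcases List.mem_cons.mp ((hmem x).mp (Or.inr hx)) with h | h
      · exact le_of_eq h.symm
      · exact le_of_lt (hkrest x h)
    have hkin : k ∈ s ∨ k ∈ t := (hmem k).mpr (List.mem_cons_self)
    -- after consuming k''s run from both lists, the recursive call matches rest
    have step : ∀ s' t' : List String, s'.Pairwise (· ≤ ·) → t'.Pairwise (· ≤ ·) →
        (∀ x, (x ∈ s' ∨ x ∈ t') ↔ x ∈ k :: rest) →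
        pvMerge (s'.filter (fun x => x ≠ k)) (t'.filter (fun x => x ≠ k))
          = rest.flatMap (fun k' => pvEntry k' (s'.count k') (t'.count k')) := by
      intro s' t' hs' ht' hmem'
      have hmemf : ∀ x, (x ∈ s'.filter (fun x => x ≠ k) ∨ x ∈ t'.filter (fun x => x ≠ k)) ↔ x ∈ rest := by
        intro x
        constructor
        · rintro (hx | hx) <;>
          · rcases List.mem_filter.mp hx with ⟨hx1, hx2⟩
            simp only [ne_eq, decide_eq_true_eq] at hx2
            rcases List.mem_cons.mp ((hmem' x).mp (by first | exact Or.inl hx1 | exact Or.inr hx1)) with h | h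
            · exact absurd h hx2
            · exact h
        · intro hx
          have hxk : x ≠ k := fun h => by
            subst h; exact absurd (hkrest x hx) (lt_irrefl x)
          rcases (hmem' x).mpr (List.mem_cons_of_mem _ hx) with h | h
          · exact Or.inl (List.mem_filter.mpr ⟨h, by simpa using hxk⟩)
          · exact Or.inr (List.mem_filter.mpr ⟨h, by simpa using hxk⟩)
      rw [ih _ _ hrest (List.Pairwise.filter _ hs') (List.Pairwise.filter _ ht') hmemf]
      apply List.flatMap_congr
      intro k' hk'
      have hne : k' ≠ k := fun h => by
        subst h; exact absurd (hkrest k' hk') (lt_irrefl k')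
      simp [List.count_filter, hne]
    rcases s with _ | ⟨x, o⟩ <;> rcases t with _ | ⟨y, n⟩
    · rcases hkin with h | h <;> simp at h
    · -- s = [], t = y :: n
      have hy : y = k := le_antisymm
        (by
          rcases hkin with h | h
          · simp at h
          · rcases List.mem_cons.mp h with h | h
            · exact le_of_eq h.symm
            · exact (List.pairwise_cons.mp ht).1 k h)
        (hmin_t y (List.mem_cons_self))
      subst hy
      rw [pvMerge, pvRun_eq y (y :: n) ht hmin_t]
      have := step [] (y :: n) (by simp) ht (by simpa using hmem)
      simp only [List.filter_nil] at this
      rw [this, List.flatMap_cons]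
      simp [pvEntry]
    · -- s = x :: o, t = []
      have hx : x = k := le_antisymm
        (by
          rcases hkin with h | h
          · rcases List.mem_cons.mp h with h | h
            · exact le_of_eq h.symm
            · exact (List.pairwise_cons.mp hs).1 k h
          · simp at h)
        (hmin_s x (List.mem_cons_self))
      subst hx
      rw [pvMerge, pvRun_eq x (x :: o) hs hmin_s]
      have := step (x :: o) [] hs (by simp) (by simpa using hmem)
      simp only [List.filter_nil] at this
      rw [this, List.flatMap_cons]
      simp [pvEntry]
    · -- s = x :: o, t = y :: n
      have hxo : ∀ b ∈ o, x ≤ b := (List.pairwise_cons.mp hs).1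
      have hyn : ∀ b ∈ n, y ≤ b := (List.pairwise_cons.mp ht).1
      have hline : (if x ≤ y then x else y) = k := by
        rcases hkin with h | h
        · have hx : x = k := le_antisymm
            (by
              rcases List.mem_cons.mp h with h | h
              · exact le_of_eq h.symm
              · exact hxo k h)
            (hmin_s x (List.mem_cons_self))
          have hky : k ≤ y := hmin_t y (List.mem_cons_self)
          rw [if_pos (hx ▸ hky), hx]
        · have hy : y = k := le_antisymm
            (by
              rcases List.mem_cons.mp h with h | h
              · exact le_of_eq h.symm
              · exact hyn k h)
            (hmin_t y (List.mem_cons_self))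
          by_cases hxy : x ≤ y
          · have hx : x = k := le_antisymm (hy ▸ hxy) (hmin_s x (List.mem_cons_self))
            rw [if_pos hxy, hx]
          · rw [if_neg hxy, hy]
      rw [pvMerge]
      simp only [hline]
      rw [pvRun_eq k (x :: o) hs hmin_s, pvRun_eq k (y :: n) ht hmin_t]
      rw [step (x :: o) (y :: n) hs ht hmem, List.flatMap_cons]

theorem get_text_diff_eq (old_text new_text : String) :
    get_text_diff old_text new_text = get_text_diff_alt old_text new_text := by
  simp only [get_text_diff, get_text_diff_alt]
  rw [List.filter_map, List.filter_map]
  set Lo := ((PySem.Str.splitlines old_text).filter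
      (fun x => PySem.Str.strip x != "")).map PySem.Str.strip with hLoDef
  set Ln := ((PySem.Str.splitlines new_text).filter
      (fun x => PySem.Str.strip x != "")).map PySem.Str.strip with hLnDef
  have hfo : (PySem.Str.splitlines old_text).filter ((fun s => s != "") ∘ PySem.Str.strip)
      = (PySem.Str.splitlines old_text).filter (fun l => PySem.Str.strip l != "") := rfl
  have hfn : (PySem.Str.splitlines new_text).filter ((fun s => s != "") ∘ PySem.Str.strip)
      = (PySem.Str.splitlines new_text).filter (fun l => PySem.Str.strip l != "") := rfl
  rw [hfo, hfn]
  set U := PySem.List.sorted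
      (PySem.Set.union (PySem.Set.ofList (PySem.Dict.counter Lo).keys)
        (PySem.Dict.counter Ln).keys) (fun x => x) false with hU
  set So := PySem.List.sorted Lo (fun x => x) false with hSo
  set Sn := PySem.List.sorted Ln (fun x => x) false with hSn
  -- A''s fold is the per-key emission over U
  have hA : U.foldl (fun acc line =>
      let old_count := (PySem.Dict.counter Lo).getD line 0
      let new_count := (PySem.Dict.counter Ln).getD line 0
      if old_count == new_count then acc
      else if new_count > old_count then
        let count := new_count - old_count
        let suffix := if count > 1 then " x" ++ PySem.Int.toStr count else ""
        acc ++ ["+ " ++ line ++ suffix]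
      else if old_count > new_count then
        let count := old_count - new_count
        let suffix := if count > 1 then " x" ++ PySem.Int.toStr count else ""
        acc ++ ["- " ++ line ++ suffix]
      else acc) []
      = U.flatMap (fun k => pvEntry k (Lo.count k) (Ln.count k)) := by
    have hbody : (fun (acc : List String) line =>
        let old_count := (PySem.Dict.counter Lo).getD line 0
        let new_count := (PySem.Dict.counter Ln).getD line 0
        if old_count == new_count then acc
        else if new_count > old_count then
          let count := new_count - old_count
          let suffix := if count > 1 then " x" ++ PySem.Int.toStr count else ""
          acc ++ ["+ " ++ line ++ suffix]
        else if old_count > new_count then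
          let count := old_count - new_count
          let suffix := if count > 1 then " x" ++ PySem.Int.toStr count else ""
          acc ++ ["- " ++ line ++ suffix]
        else acc)
        = (fun acc line => acc ++ pvEntry line (Lo.count line) (Ln.count line)) := by
      funext acc line
      simp only [PySem.Dict.getD_counter, pvEntry]
      set oc := (Lo.count line : Int)
      set nc := (Ln.count line : Int)
      by_cases h0 : oc = nc
      · simp [h0]
      · by_cases hgt : nc > oc
        · have h1 : nc - oc ≠ 0 := by omega
          have h2 : nc - oc > 0 := by omega
          have h3 : |nc - oc| = nc - oc := abs_of_pos h2
          have h4 : (oc == nc) = false := by simp [h0]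
          simp only [h4, Bool.false_eq_true, if_false, if_pos hgt, if_pos h1, if_pos h2, h3]
        · have hlt : oc > nc := by omega
          have h1 : nc - oc ≠ 0 := by omega
          have h2 : ¬ (nc - oc > 0) := by omega
          have h3 : |nc - oc| = oc - nc := by rw [abs_of_neg (by omega)]; ring
          simp only [if_neg hgt, if_pos hlt, if_pos h1, if_neg h2, h3]
          simp [h0]
    rw [hbody, PySem.List.foldl_append_eq_flatMap]
    rfl
  -- B''s merge is the same emission over U
  have hB : pvMerge So Sn = U.flatMap (fun k => pvEntry k (Lo.count k) (Ln.count k)) := by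
    have hcntS : ∀ k, So.count k = Lo.count k :=
      fun k => (PySem.List.sorted_perm Lo (fun x => x) false).count_eq k
    have hcntT : ∀ k, Sn.count k = Ln.count k :=
      fun k => (PySem.List.sorted_perm Ln (fun x => x) false).count_eq k
    have hUnodup : U.Nodup :=
      ((PySem.List.sorted_perm _ _ _).nodup_iff).mpr
        (PySem.Set.nodup_union _ _ (PySem.Set.nodup_ofList _))
    have hUle : U.Pairwise (· ≤ ·) := PySem.List.sorted_pairwise _ _
    have hUlt : U.Pairwise (· < ·) := by
      have := hUle.and hUnodup
      exact this.imp (fun h => lt_of_le_of_ne h.1 h.2)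
    rw [pvMerge_eq U So Sn hUlt
      (PySem.List.sorted_pairwise _ _) (PySem.List.sorted_pairwise _ _) ?_]
    · exact List.flatMap_congr (fun k _ => by rw [hcntS, hcntT])
    · intro x
      rw [hSo, hSn, hU, PySem.List.mem_sorted, PySem.List.mem_sorted, PySem.List.mem_sorted,
        PySem.Set.mem_union, PySem.Set.mem_ofList, PySem.Dict.keys_counter,
        PySem.Dict.keys_counter, PySem.Set.mem_ofList, PySem.Set.mem_ofList]
  rw [hA, hB]

-- ===== VERDICT (by name: the statement is the Claim_ definition above) =====
theorem get_text_diff_spec : Claim_equal_get_text_diff := by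
  intro o n _
  exact get_text_diff_eq o n
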